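-- pv_equiv track=rewrite | github.com/ramovsky/Study | Checkio/tetris/checkio_org/referee.py | put_figure
-- ===== SOURCE A (Python) =====
-- import copy
--
-- def put_figure(figure, gmap, x_position):
--     height = len(gmap)
--     start_y = y_position = height - 1 - len(figure)
--     new_map = copy.deepcopy(gmap)
--     while y_position >= 0:
--         cur_map = copy.deepcopy(gmap)
--         good_position = True
--         for i, row in enumerate(reversed(figure)):
--             for j, el in enumerate(row):
--                 if not el:
--                     continue
--                 if el and gmap[y_position + i][x_position + j]:
--                     good_position = False
--                     break
--                 if el:
--                     cur_map[y_position + i][x_position + j] = el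
--         if not good_position:
--             if y_position == start_y:
--                 return False, new_map
--             return True, new_map
--         y_position -= 1
--         new_map = copy.deepcopy(cur_map)
--     return True, new_map
-- ===== SOURCE B (Python) =====
-- def put_figure(figure, gmap, x_position):
--     height = len(gmap)
--     start_y = height - 1 - len(figure)
--     new_map = [row[:] for row in gmap]
--     if start_y < 0:
--         return True, new_map
--     cells = [(i, j, el)
--              for i, row in enumerate(reversed(figure))
--              for j, el in enumerate(row) if el]
--
--     def collides(y):
--         return any(gmap[y + i][x_position + j] for (i, j, _el) in cells)
--
--     if collides(start_y):
--         return False, new_map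
--     y = start_y
--     while y > 0 and not collides(y - 1):
--         y -= 1
--     for i, j, el in cells:
--         new_map[y + i][x_position + j] = el
--     return True, new_map
-- ===== Notes on version B (the rewrite author's own statement) =====
-- stated objective: faster
-- what changed: Instead of re-deepcopying and re-stamping the whole map at every candidate height, B extracts the figure's nonzero cells once, finds the resting height with a cheap per-cell collision scan, and writes the figure into a single copied map in one final pass.
import Mathlib
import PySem

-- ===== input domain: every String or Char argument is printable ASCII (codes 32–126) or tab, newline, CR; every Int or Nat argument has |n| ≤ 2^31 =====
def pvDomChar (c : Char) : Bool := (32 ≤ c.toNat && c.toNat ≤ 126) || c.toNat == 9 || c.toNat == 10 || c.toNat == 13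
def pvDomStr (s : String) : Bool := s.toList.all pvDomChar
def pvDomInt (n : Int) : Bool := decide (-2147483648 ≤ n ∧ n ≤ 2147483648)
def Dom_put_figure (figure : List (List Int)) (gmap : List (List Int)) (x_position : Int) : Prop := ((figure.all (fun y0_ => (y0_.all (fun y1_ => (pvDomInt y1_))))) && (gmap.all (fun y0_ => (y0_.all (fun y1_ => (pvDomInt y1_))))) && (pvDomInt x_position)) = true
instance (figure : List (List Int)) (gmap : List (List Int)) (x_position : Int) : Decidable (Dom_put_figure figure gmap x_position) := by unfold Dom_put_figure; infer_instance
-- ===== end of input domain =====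

-- B replaces A's per-height deepcopy-and-place loop by a cheap collision-only scan for the
-- resting height plus ONE placement pass (objective: faster; both ports return fresh maps, no mutation).

-- shared 2-D indexing helper: Python m[r][c] read and m[r][c] = v write
-- (negative index wraps exactly as in Python; the out-of-range default is never reached under Pre_)
def pvGet2 (m : List (List Int)) (r c : Int) : Int :=
  PySem.List.pyGetD (PySem.List.pyGetD m r []) c 0

def pvSet2 (m : List (List Int)) (r c : Int) (v : Int) : List (List Int) :=
  PySem.List.pySetD m r (PySem.List.pySetD (PySem.List.pyGetD m r []) c v)

-- ===== PORT A =====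
-- inner 'for j, el in enumerate(row)' with its break; state = (good_position, cur_map)
def pfInner (gmap : List (List Int)) (x r : Int) : List Int → Nat → List (List Int) → Bool × List (List Int)
  | [], _, cur => (true, cur)
  | el :: rest, j, cur =>
    if el = 0 then pfInner gmap x r rest (j+1) cur                      -- if not el: continue
    else if pvGet2 gmap r (x + (j:Int)) != 0 then (false, cur)          -- good_position = False; break
    else pfInner gmap x r rest (j+1) (pvSet2 cur r (x + (j:Int)) el)    -- cur_map[...] = el

-- outer 'for i, row in enumerate(reversed(figure))' (caller passes figure.reverse)
def pfRows (gmap : List (List Int)) (x y : Int) : List (List Int) → Nat → Bool → List (List Int) → Bool × List (List Int)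
  | [], _, good, cur => (good, cur)
  | row :: rows, i, good, cur =>
    let gc := pfInner gmap x (y + (i:Int)) row 0 cur
    pfRows gmap x y rows (i+1) (good && gc.1) gc.2

-- 'while y_position >= 0': recursion on the remaining y values, y = fuel - 1
def pfWhile (figure gmap : List (List Int)) (x start_y : Int) : Nat → List (List Int) → Bool × List (List Int)
  | 0, nm => (true, nm)
  | n+1, nm =>
    let body := pfRows gmap x (n:Int) figure.reverse 0 true gmap        -- cur_map = deepcopy(gmap)
    if body.1 then pfWhile figure gmap x start_y n body.2               -- y -= 1; new_map = cur_map
    else if (n:Int) = start_y then (false, nm) else (true, nm)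

def put_figure (figure : List (List Int)) (gmap : List (List Int)) (x_position : Int) : Bool × List (List Int) :=
  -- start_y = len(gmap) - 1 - len(figure); loop fuel = number of y values start_y, …, 0
  pfWhile figure gmap x_position ((gmap.length : Int) - 1 - (figure.length : Int))
    (((gmap.length : Int) - 1 - (figure.length : Int)) + 1).toNat gmap

-- ===== PORT B =====
-- the cell list [(i, j, el) | i, row in enumerate(reversed(figure)), j, el in enumerate(row), el]
def pvRowCells (i : Nat) : List Int → Nat → List (Nat × Nat × Int)
  | [], _ => []
  | el :: rest, j => if el != 0 then (i, j, el) :: pvRowCells i rest (j+1) else pvRowCells i rest (j+1)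

def pvCells : List (List Int) → Nat → List (Nat × Nat × Int)
  | [], _ => []
  | row :: rows, i => pvRowCells i row 0 ++ pvCells rows (i+1)

def pvCollides (gmap : List (List Int)) (x : Int) (cells : List (Nat × Nat × Int)) (y : Int) : Bool :=
  cells.any (fun c => pvGet2 gmap (y + (c.1:Int)) (x + (c.2.1:Int)) != 0)

-- 'while y > 0 and not collides(y - 1): y -= 1'
def pvDescend (gmap : List (List Int)) (x : Int) (cells : List (Nat × Nat × Int)) : Nat → Nat
  | 0 => 0
  | n+1 => if pvCollides gmap x cells (n:Int) then n+1 else pvDescend gmap x cells n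

-- the single placement pass 'for i, j, el in cells: new_map[y+i][x+j] = el'
def pvPlace (gmap : List (List Int)) (x : Int) (cells : List (Nat × Nat × Int)) (y : Nat) : List (List Int) :=
  cells.foldl (fun m c => pvSet2 m ((y:Int) + (c.1:Int)) (x + (c.2.1:Int)) c.2.2) gmap

def put_figure_alt (figure : List (List Int)) (gmap : List (List Int)) (x_position : Int) : Bool × List (List Int) :=
  -- start_y = len(gmap) - 1 - len(figure)
  if (gmap.length : Int) - 1 - (figure.length : Int) < 0 then (true, gmap)
  else if pvCollides gmap x_position (pvCells figure.reverse 0)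
            ((gmap.length : Int) - 1 - (figure.length : Int)) then (false, gmap)
  else (true, pvPlace gmap x_position (pvCells figure.reverse 0)
    (pvDescend gmap x_position (pvCells figure.reverse 0)
      ((gmap.length : Int) - 1 - (figure.length : Int)).toNat))

-- ===== PRECONDITION & SPEC =====
-- Pre_ excludes inputs where some nonzero figure cell's column falls outside a non-bottom gmap row
-- (there Python A raises IndexError on most such inputs; on a few A still returns because a collision
-- is met first or the short row is never overlapped — a mild conservative narrowing, see cites).
def Pre_put_figure (figure : List (List Int)) (gmap : List (List Int)) (x_position : Int) : Prop :=
  (gmap.length : Int) - 1 - (figure.length : Int) < 0 ∨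
  ∀ g ∈ gmap.dropLast, ∀ row ∈ figure, ∀ j : Nat, j < row.length → row.getD j 0 ≠ 0 →
    -(g.length : Int) ≤ x_position + (j:Int) ∧ x_position + (j:Int) < (g.length : Int)
instance (figure : List (List Int)) (gmap : List (List Int)) (x_position : Int) : Decidable (Pre_put_figure figure gmap x_position) := by unfold Pre_put_figure; infer_instance

def pvWitness_put_figure : List (List Int) × List (List Int) × Int := ([[1]], [[0], [0]], 0)

def Spec_put_figure (figure : List (List Int)) (gmap : List (List Int)) (x_position : Int) (out : Bool × List (List Int)) : Prop := out = put_figure_alt figure gmap x_position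
instance (figure : List (List Int)) (gmap : List (List Int)) (x_position : Int) (out : Bool × List (List Int)) : Decidable (Spec_put_figure figure gmap x_position out) := by unfold Spec_put_figure; infer_instance

-- ===== CLAIM (what is proved, stated in full; the proofs are below) =====
def Claim_equal_put_figure : Prop := ∀ (figure : List (List Int)) (gmap : List (List Int)) (x_position : Int), Dom_put_figure figure gmap x_position → Pre_put_figure figure gmap x_position → Spec_put_figure figure gmap x_position (put_figure figure gmap x_position)

-- ===== LEMMAS AND PROOFS =====

lemma pfInner_fst (gmap : List (List Int)) (x y : Int) (i : Nat) :
    ∀ (row : List Int) (j : Nat) (cur : List (List Int)),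
      (pfInner gmap x (y + (i:Int)) row j cur).1 =
        !((pvRowCells i row j).any (fun c => pvGet2 gmap (y + (c.1:Int)) (x + (c.2.1:Int)) != 0)) := by
  intro row
  induction row with
  | nil => intro j cur; simp [pfInner, pvRowCells]
  | cons el rest ih =>
    intro j cur
    by_cases h0 : el = 0
    · simp [pfInner, pvRowCells, h0, ih]
    · by_cases hc : pvGet2 gmap (y + (i:Int)) (x + (j:Int)) = 0
      · simp [pfInner, pvRowCells, h0, hc, ih]
      · simp [pfInner, pvRowCells, h0, hc]

lemma pfInner_free (gmap : List (List Int)) (x y : Int) (i : Nat) :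
    ∀ (row : List Int) (j : Nat) (cur : List (List Int)),
      ((pvRowCells i row j).any (fun c => pvGet2 gmap (y + (c.1:Int)) (x + (c.2.1:Int)) != 0)) = false →
      pfInner gmap x (y + (i:Int)) row j cur =
        (true, (pvRowCells i row j).foldl
          (fun m c => pvSet2 m (y + (c.1:Int)) (x + (c.2.1:Int)) c.2.2) cur) := by
  intro row
  induction row with
  | nil => intro j cur _; simp [pfInner, pvRowCells]
  | cons el rest ih =>
    intro j cur hfree
    by_cases h0 : el = 0
    · rw [show pvRowCells i (el :: rest) j = pvRowCells i rest (j+1) from by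
        simp [pvRowCells, h0]] at hfree ⊢
      simpa [pfInner, h0] using ih (j+1) cur hfree
    · rw [show pvRowCells i (el :: rest) j = (i, j, el) :: pvRowCells i rest (j+1) from by
        simp [pvRowCells, h0]] at hfree ⊢
      rw [List.any_cons, Bool.or_eq_false_iff] at hfree
      obtain ⟨hc, hrest⟩ := hfree
      have hc' : pvGet2 gmap (y + (i:Int)) (x + (j:Int)) = 0 := by simpa using hc
      simpa [pfInner, h0, hc'] using ih (j+1) _ hrest

lemma pfRows_fst (gmap : List (List Int)) (x y : Int) :
    ∀ (rows : List (List Int)) (i : Nat) (good : Bool) (cur : List (List Int)),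
      (pfRows gmap x y rows i good cur).1 =
        (good && !((pvCells rows i).any (fun c => pvGet2 gmap (y + (c.1:Int)) (x + (c.2.1:Int)) != 0))) := by
  intro rows
  induction rows with
  | nil => intro i good cur; simp [pfRows, pvCells]
  | cons row rest ih =>
    intro i good cur
    simp only [pfRows, pvCells, List.any_append, ih, pfInner_fst]
    cases good <;> cases h : (pvRowCells i row 0).any _ <;>
      simp_all [Bool.and_assoc]

lemma pfRows_free (gmap : List (List Int)) (x y : Int) :
    ∀ (rows : List (List Int)) (i : Nat) (good : Bool) (cur : List (List Int)),
      ((pvCells rows i).any (fun c => pvGet2 gmap (y + (c.1:Int)) (x + (c.2.1:Int)) != 0)) = false →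
      pfRows gmap x y rows i good cur =
        (good, (pvCells rows i).foldl
          (fun m c => pvSet2 m (y + (c.1:Int)) (x + (c.2.1:Int)) c.2.2) cur) := by
  intro rows
  induction rows with
  | nil => intro i good cur _; simp [pfRows, pvCells]
  | cons row rest ih =>
    intro i good cur hfree
    simp only [pvCells, List.any_append, Bool.or_eq_false_iff] at hfree
    obtain ⟨hrow, hrest⟩ := hfree
    simp only [pfRows, pvCells, pfInner_free gmap x y i row 0 cur hrow, List.foldl_append]
    simpa using ih (i+1) (good && true) _ hrest

lemma pfWhile_eq (figure gmap : List (List Int)) (x start_y : Int) :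
    ∀ n : Nat, (n : Int) ≤ start_y →
      pfWhile figure gmap x start_y n (pvPlace gmap x (pvCells figure.reverse 0) n) =
        (true, pvPlace gmap x (pvCells figure.reverse 0) (pvDescend gmap x (pvCells figure.reverse 0) n)) := by
  intro n
  induction n with
  | zero => intro _; simp [pfWhile, pvDescend]
  | succ n ih =>
    intro hle
    have hfst := pfRows_fst gmap x (n:Int) figure.reverse 0 true gmap
    by_cases hc : pvCollides gmap x (pvCells figure.reverse 0) ((n:Int)) = true
    · have hbody : (pfRows gmap x (n:Int) figure.reverse 0 true gmap).1 = false := by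
        simp [hfst]; simpa [pvCollides] using hc
      have hne : ((n:Int)) ≠ start_y := by push_cast at hle ⊢; omega
      simp [pfWhile, hbody, hne, pvDescend, hc]
    · have hfree : ((pvCells figure.reverse 0).any
          (fun c => pvGet2 gmap ((n:Int) + (c.1:Int)) (x + (c.2.1:Int)) != 0)) = false := by
        simpa [pvCollides] using hc
      have hbody := pfRows_free gmap x (n:Int) figure.reverse 0 true gmap hfree
      have hfst' : (pfRows gmap x (n:Int) figure.reverse 0 true gmap).1 = true := by
        simp [hfst, hfree]
      have hstep : (n:Int) ≤ start_y := by push_cast at hle ⊢; omega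
      simp only [pfWhile, hfst', if_true, hbody]
      have : ((pvCells figure.reverse 0).foldl
          (fun m c => pvSet2 m ((n:Int) + (c.1:Int)) (x + (c.2.1:Int)) c.2.2) gmap) =
          pvPlace gmap x (pvCells figure.reverse 0) n := rfl
      rw [this, ih hstep]
      simp [pvDescend, hc]

-- ===== VERDICT (by name: the statement is the Claim_ definition above) =====
theorem put_figure_spec : Claim_equal_put_figure := by
  intro figure gmap x _dom _pre
  unfold Spec_put_figure put_figure put_figure_alt
  set star : Int := (gmap.length : Int) - 1 - (figure.length : Int) with hstar
  by_cases hs : star < 0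
  · have h0 : (star + 1).toNat = 0 := by omega
    simp [h0, pfWhile, hs]
  · push_neg at hs
    have h1 : (star + 1).toNat = star.toNat + 1 := by omega
    have h2 : ((star.toNat : Int)) = star := Int.toNat_of_nonneg hs
    rw [h1]
    by_cases hc : pvCollides gmap x (pvCells figure.reverse 0) star = true
    · have hfst : (pfRows gmap x star figure.reverse 0 true gmap).1 = false := by
        rw [pfRows_fst]
        simpa [pvCollides] using hc
      simp [pfWhile, h2, hfst, hc, not_lt.mpr hs]
    · have hfree : ((pvCells figure.reverse 0).any
          (fun c => pvGet2 gmap (star + (c.1:Int)) (x + (c.2.1:Int)) != 0)) = false := by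
        simpa [pvCollides] using hc
      have hbody := pfRows_free gmap x star figure.reverse 0 true gmap hfree
      have hplace : pvPlace gmap x (pvCells figure.reverse 0) star.toNat =
          (pvCells figure.reverse 0).foldl
            (fun m c => pvSet2 m (star + (c.1:Int)) (x + (c.2.1:Int)) c.2.2) gmap := by
        simp [pvPlace, h2]
      simp only [pfWhile, h2, hbody]
      rw [← hplace, pfWhile_eq figure gmap x star star.toNat (le_of_eq h2)]
      simp [not_lt.mpr hs, hc]
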